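-- pv_equiv track=rewrite | github.com/ana28p/code-analyzer | datareading/transformscripts.py | replace_by_token
-- ===== SOURCE A (Python) =====
-- type_dict = {'byte': 'Byte', 'sbyte': 'SByte', 'int': 'Int32', 'uint': 'UInt32', 'short': 'Int16', 'ushort': 'UInt16',
--              'long': 'Int64', 'ulong': 'UInt64', 'float': 'Single', 'double': 'Double', 'char': 'Char',
--              'bool': 'Boolean', 'object': 'Object', 'string': 'String', 'decimal': 'Decimal', 'dynamic': 'Object'}
--
-- def get_type_outbox(param_type):
--     if param_type in type_dict:
--         return type_dict[param_type]
--     return param_type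
--
-- def handle_token(token, remove_parentclass, replace_type):
--     if remove_parentclass:
--         token = token[token.rfind(".") + 1:]
--     if replace_type:
--         token = get_type_outbox(token)
--     return token
--
-- def replace_by_token(param_type, remove_parentclass, replace_type):
--     delims = "<>,[]()"
--     token = ''
--     new_param_type = ''
--     for i in range(len(param_type)):
--         if param_type[i] in delims:
--             replace = handle_token(token, remove_parentclass, replace_type)
--             token = ''
--             new_param_type += replace + param_type[i]
--         else:
--             token = token + param_type[i]
--             if i == len(param_type) - 1:
--                 replace = handle_token(token, remove_parentclass, replace_type)
--                 new_param_type += replace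
--     return new_param_type
-- ===== SOURCE B (Python) =====
-- type_dict = {'byte': 'Byte', 'sbyte': 'SByte', 'int': 'Int32', 'uint': 'UInt32', 'short': 'Int16', 'ushort': 'UInt16',
--              'long': 'Int64', 'ulong': 'UInt64', 'float': 'Single', 'double': 'Double', 'char': 'Char',
--              'bool': 'Boolean', 'object': 'Object', 'string': 'String', 'decimal': 'Decimal', 'dynamic': 'Object'}
--
-- def get_type_outbox(param_type):
--     if param_type in type_dict:
--         return type_dict[param_type]
--     return param_type
--
-- def handle_token(token, remove_parentclass, replace_type):
--     if remove_parentclass: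
--         token = token[token.rfind(".") + 1:]
--     if replace_type:
--         token = get_type_outbox(token)
--     return token
--
-- def replace_by_token(param_type, remove_parentclass, replace_type):
--     # split-first: alternating [token, delim, token, delim, ..., token]
--     parts = []
--     buf = []
--     for ch in param_type:
--         if ch in '<>,[]()':
--             parts.append(''.join(buf))
--             parts.append(ch)
--             buf = []
--         else:
--             buf.append(ch)
--     parts.append(''.join(buf))
--     return ''.join(handle_token(p, remove_parentclass, replace_type) if i % 2 == 0 else p
--                    for i, p in enumerate(parts))
-- ===== Notes on version B (the rewrite author's own statement) =====
-- stated objective: idiomatic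
-- what changed: Replaces the char-by-char accumulate-and-flush loop (with its special last-index flush) by a split-first pass producing an alternating token/delimiter list, then a map of handle_token over the token positions joined back together; list-buffer + ''.join instead of repeated string += gives a constant-factor speedup.
import Mathlib
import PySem

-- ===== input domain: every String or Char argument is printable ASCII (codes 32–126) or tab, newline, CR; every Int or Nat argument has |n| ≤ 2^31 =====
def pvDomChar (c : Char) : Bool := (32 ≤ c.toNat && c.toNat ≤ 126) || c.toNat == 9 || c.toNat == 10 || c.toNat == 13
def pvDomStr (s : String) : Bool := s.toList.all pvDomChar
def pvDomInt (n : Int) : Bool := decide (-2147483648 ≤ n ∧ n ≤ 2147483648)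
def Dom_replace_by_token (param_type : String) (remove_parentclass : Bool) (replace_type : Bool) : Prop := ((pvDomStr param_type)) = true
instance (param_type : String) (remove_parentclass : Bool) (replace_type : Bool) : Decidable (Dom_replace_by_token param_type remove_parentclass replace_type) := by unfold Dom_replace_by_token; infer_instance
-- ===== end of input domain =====

-- B replaces A's accumulate-and-flush character loop by split-into-alternating-parts then map-and-join (idiomatic decomposition, same cost).

-- ===== PORT A =====
-- shared helpers (identical in Source A and Source B): type_dict, get_type_outbox, handle_token
def typeDict : PySem.Dict String String := PySem.Dict.ofList
  [("byte", "Byte"), ("sbyte", "SByte"), ("int", "Int32"), ("uint", "UInt32"), ("short", "Int16"),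
   ("ushort", "UInt16"), ("long", "Int64"), ("ulong", "UInt64"), ("float", "Single"), ("double", "Double"),
   ("char", "Char"), ("bool", "Boolean"), ("object", "Object"), ("string", "String"),
   ("decimal", "Decimal"), ("dynamic", "Object")]

def getTypeOutbox (t : List Char) : List Char :=
  match PySem.Dict.get? typeDict (String.mk t) with
  | some v => v.toList
  | none => t

def handleTok (token : List Char) (remove_parentclass replace_type : Bool) : List Char :=
  let token := if remove_parentclass
    then PySem.List.slice token (some (PySem.Chars.rfind token ['.'] + 1)) none
    else token
  if replace_type then getTypeOutbox token else token

def delimsChars : List Char := ['<', '>', ',', '[', ']', '(', ')']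

-- A's loop: index i over the string, state (token, new_param_type); 'rest = []' is A's 'i == len-1'
def loopA (rp rt : Bool) : List Char → List Char → List Char → List Char
  | [], _token, acc => acc
  | c :: rest, token, acc =>
    if delimsChars.contains c then
      loopA rp rt rest [] (acc ++ handleTok token rp rt ++ [c])
    else
      match rest with
      | [] => acc ++ handleTok (token ++ [c]) rp rt
      | _ :: _ => loopA rp rt rest (token ++ [c]) acc

def replace_by_token (param_type : String) (remove_parentclass : Bool) (replace_type : Bool) : String :=
  String.mk (loopA remove_parentclass replace_type param_type.toList [] [])

-- ===== PORT B =====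
-- split into the alternating list [token, delim, token, delim, …, token] (B's first loop)
def splitParts : List Char → List (List Char)
  | [] => [[]]
  | c :: rest =>
    if delimsChars.contains c then [] :: [c] :: splitParts rest
    else
      match splitParts rest with
      | [] => [[c]]
      | p :: ps => (c :: p) :: ps

-- join, applying handle_token at even (token) positions (B's ''.join over enumerate)
def joinAlt (rp rt : Bool) : List (List Char) → List Char
  | [] => []
  | [t] => handleTok t rp rt
  | t :: d :: rest => handleTok t rp rt ++ d ++ joinAlt rp rt rest

def replace_by_token_alt (param_type : String) (remove_parentclass : Bool) (replace_type : Bool) : String :=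
  String.mk (joinAlt remove_parentclass replace_type (splitParts param_type.toList))

-- ===== PRECONDITION & SPEC =====
def Spec_replace_by_token (param_type : String) (remove_parentclass : Bool) (replace_type : Bool) (out : String) : Prop := out = replace_by_token_alt param_type remove_parentclass replace_type
instance (param_type : String) (remove_parentclass : Bool) (replace_type : Bool) (out : String) : Decidable (Spec_replace_by_token param_type remove_parentclass replace_type out) := by unfold Spec_replace_by_token; infer_instance

-- ===== CLAIM (what is proved, stated in full; the proofs are below) =====
def Claim_equal_replace_by_token : Prop := ∀ (param_type : String) (remove_parentclass : Bool) (replace_type : Bool), Dom_replace_by_token param_type remove_parentclass replace_type → Spec_replace_by_token param_type remove_parentclass replace_type (replace_by_token param_type remove_parentclass replace_type)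

-- ===== LEMMAS AND PROOFS =====
theorem splitParts_ne_nil (cs : List Char) : splitParts cs ≠ [] := by
  cases cs with
  | nil => simp [splitParts]
  | cons c rest =>
    unfold splitParts
    split
    · simp
    · cases h : splitParts rest <;> simp

theorem handleTok_nil : ∀ rp rt : Bool, handleTok [] rp rt = [] := by decide

-- prefix the pending token onto the first (token) part
def consFirst (t : List Char) : List (List Char) → List (List Char)
  | [] => [t]
  | p :: ps => (t ++ p) :: ps

theorem loopA_eq (rp rt : Bool) (cs : List Char) :
    ∀ token acc, cs ≠ [] →
      loopA rp rt cs token acc = acc ++ joinAlt rp rt (consFirst token (splitParts cs)) := by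
  induction cs with
  | nil => intro _ _ h; exact absurd rfl h
  | cons c rest ih =>
    intro token acc _
    unfold loopA splitParts
    by_cases hc : delimsChars.contains c = true
    · rw [if_pos hc, if_pos hc]
      cases hr : rest with
      | nil =>
        subst hr
        simp [loopA, consFirst, splitParts, joinAlt, handleTok_nil]
      | cons d ds =>
        subst hr
        rw [ih [] (acc ++ handleTok token rp rt ++ [c]) (by simp)]
        obtain ⟨p, ps, hps⟩ : ∃ p ps, splitParts (d :: ds) = p :: ps := by
          cases h : splitParts (d :: ds) with
          | nil => exact absurd h (splitParts_ne_nil _)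
          | cons p ps => exact ⟨p, ps, rfl⟩
        simp [hps, consFirst, joinAlt]
    · rw [if_neg hc, if_neg hc]
      cases hr : rest with
      | nil =>
        subst hr
        simp [consFirst, splitParts, joinAlt]
      | cons d ds =>
        subst hr
        rw [ih (token ++ [c]) acc (by simp)]
        obtain ⟨p, ps, hps⟩ : ∃ p ps, splitParts (d :: ds) = p :: ps := by
          cases h : splitParts (d :: ds) with
          | nil => exact absurd h (splitParts_ne_nil _)
          | cons p ps => exact ⟨p, ps, rfl⟩
        simp [hps, consFirst]

-- ===== VERDICT (by name: the statement is the Claim_ definition above) =====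
theorem replace_by_token_spec : Claim_equal_replace_by_token := by
  intro s rp rt _
  unfold Spec_replace_by_token replace_by_token replace_by_token_alt
  cases h : s.toList with
  | nil => simp [loopA, splitParts, joinAlt, handleTok_nil]
  | cons c rest =>
    rw [loopA_eq rp rt (c :: rest) [] [] (by simp)]
    obtain ⟨p, ps, hps⟩ : ∃ p ps, splitParts (c :: rest) = p :: ps := by
      cases hh : splitParts (c :: rest) with
      | nil => exact absurd hh (splitParts_ne_nil _)
      | cons p ps => exact ⟨p, ps, rfl⟩
    simp [hps, consFirst]
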